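-- pv_equiv track=rewrite | github.com/UIC-InDeXLab/HIRA | benchmark_area/kernel_impl/TA_filter_alg/kernels/TA_build.py | split_contiguous
-- ===== SOURCE A (Python) =====
-- def split_contiguous(d: int, s_count: int) -> list[tuple[int, int]]:
--     sub = d // s_count
--     rem = d % s_count
--     out: list[tuple[int, int]] = []
--     off = 0
--     for idx in range(s_count):
--         width = sub + (1 if idx < rem else 0)
--         out.append((off, off + width))
--         off += width
--     return out
-- ===== SOURCE B (Python) =====
-- def split_contiguous(d: int, s_count: int) -> list[tuple[int, int]]:
--     sub, rem = divmod(d, s_count)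
--     return [(idx * sub + min(idx, rem), (idx + 1) * sub + min(idx + 1, rem))
--             for idx in range(s_count)]
-- ===== Notes on version B (the rewrite author's own statement) =====
-- stated objective: simpler
-- what changed: Replaces the running-offset accumulator loop with a single comprehension computing each interval independently from a closed-form offset idx*sub + min(idx, rem).
import Mathlib
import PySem

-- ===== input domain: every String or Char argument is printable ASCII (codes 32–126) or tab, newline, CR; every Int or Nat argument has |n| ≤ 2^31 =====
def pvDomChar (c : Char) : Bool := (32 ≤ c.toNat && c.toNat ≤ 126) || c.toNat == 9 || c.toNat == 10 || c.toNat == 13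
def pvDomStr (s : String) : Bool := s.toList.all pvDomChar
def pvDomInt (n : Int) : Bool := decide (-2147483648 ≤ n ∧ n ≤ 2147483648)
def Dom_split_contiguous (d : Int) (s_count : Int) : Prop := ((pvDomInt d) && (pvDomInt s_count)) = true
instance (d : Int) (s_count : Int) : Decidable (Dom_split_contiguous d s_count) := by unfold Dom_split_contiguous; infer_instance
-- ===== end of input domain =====

-- B replaces A's running-offset accumulator loop by a closed-form offset idx*sub + min(idx, rem) per index (simpler decomposition, same cost).


-- ===== PORT A =====
-- literal transliteration of A: running offset accumulator over range(s_count)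
def split_contiguous (d : Int) (s_count : Int) : List (Int × Int) :=
  let sub := PySem.Int.floordiv d s_count
  let rem := PySem.Int.mod d s_count
  let st := (PySem.List.pyRange 0 s_count 1).foldl
    (fun (acc : List (Int × Int) × Int) idx =>
      let width := sub + (if idx < rem then (1 : Int) else 0)
      (acc.1 ++ [(acc.2, acc.2 + width)], acc.2 + width))
    ([], 0)
  st.1

-- ===== PORT B =====
-- literal transliteration of B: each interval computed independently from a closed-form offset
def split_contiguous_alt (d : Int) (s_count : Int) : List (Int × Int) :=
  let sub := PySem.Int.floordiv d s_count
  let rem := PySem.Int.mod d s_count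
  (PySem.List.pyRange 0 s_count 1).map
    (fun idx => (idx * sub + min idx rem, (idx + 1) * sub + min (idx + 1) rem))

-- ===== PRECONDITION & SPEC =====
-- Pre_ excludes only s_count = 0, where Python A raises ZeroDivisionError.
def Pre_split_contiguous (d : Int) (s_count : Int) : Prop := s_count ≠ 0
instance (d : Int) (s_count : Int) : Decidable (Pre_split_contiguous d s_count) := by unfold Pre_split_contiguous; infer_instance
def pvWitness_split_contiguous : Int × Int := (10, 3)

def Spec_split_contiguous (d : Int) (s_count : Int) (out : List (Int × Int)) : Prop := out = split_contiguous_alt d s_count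
instance (d : Int) (s_count : Int) (out : List (Int × Int)) : Decidable (Spec_split_contiguous d s_count out) := by unfold Spec_split_contiguous; infer_instance

-- ===== CLAIM =====
def Claim_equal_split_contiguous : Prop := ∀ (d : Int) (s_count : Int), Dom_split_contiguous d s_count → Pre_split_contiguous d s_count → Spec_split_contiguous d s_count (split_contiguous d s_count)

-- ===== LEMMAS AND PROOFS =====

theorem split_contiguous_fold_inv (sub rem : Int) (hrem : 0 ≤ rem) (n : Nat) :
    (PySem.List.pyRange 0 n 1).foldl
      (fun (acc : List (Int × Int) × Int) idx =>
        (acc.1 ++ [(acc.2, acc.2 + (sub + if idx < rem then (1 : Int) else 0))],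
         acc.2 + (sub + if idx < rem then (1 : Int) else 0)))
      ([], 0)
    = ((PySem.List.pyRange 0 n 1).map
        (fun idx => (idx * sub + min idx rem, (idx + 1) * sub + min (idx + 1) rem)),
       (n : Int) * sub + min (n : Int) rem) := by
  have key : ∀ m : Int, min (m + 1) rem = min m rem + (if m < rem then (1 : Int) else 0) := by
    intro m; by_cases hc : m < rem <;> simp [hc] <;> omega
  induction n with
  | zero => simp [PySem.List.pyRange_one_eq_nil, hrem]
  | succ n ih =>
    have h : PySem.List.pyRange 0 ((n : Int) + 1) 1
        = PySem.List.pyRange 0 (n : Int) 1 ++ [(n : Int)] :=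
      PySem.List.pyRange_one_succ_right (by exact_mod_cast Nat.zero_le n)
    push_cast
    rw [h, List.foldl_append, List.map_append, ih]
    simp only [List.foldl_cons, List.foldl_nil, List.map_cons, List.map_nil]
    rw [key, show ((n : Int) + 1) * sub = (n : Int) * sub + sub from by ring]
    simp [Prod.ext_iff]
    all_goals ring

-- ===== VERDICT =====
theorem split_contiguous_spec : Claim_equal_split_contiguous := by
  intro d s_count _hd hs
  unfold Spec_split_contiguous
  simp only [split_contiguous, split_contiguous_alt]
  rcases lt_trichotomy s_count 0 with hneg | hz | hpos
  · rw [PySem.List.pyRange_one_eq_nil hneg.le]; simp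
  · exact absurd hz hs
  · have hrem : 0 ≤ PySem.Int.mod d s_count := by
      rw [PySem.Int.mod_eq_emod_of_pos hpos]; exact Int.emod_nonneg d (by omega)
    have hn : s_count = ((s_count.toNat : Nat) : Int) := by omega
    rw [hn] at hrem ⊢
    rw [split_contiguous_fold_inv _ _ hrem s_count.toNat]
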